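-- pv_equiv track=rewrite | github.com/bhargavraju/practice-dsa | searching/peak_element.py | solve
-- ===== SOURCE A (Python) =====
-- def solve(A):
--     d = 2
--     A = int(A)
--     ans = A - 1
--     while pow(2, d) <= A + 1:
--         left, right = 2, A - 1
--         while left <= right:
--             base = (left + right) // 2
--             calc = (pow(base, d) - 1) // (base - 1)
--             if calc == A:
--                 ans = min(ans, base)
--                 right = base - 1
--             elif calc > A:
--                 right = base - 1
--             else:
--                 left = base + 1
--         d += 1
--     return ans
-- ===== SOURCE B (Python) =====
-- def solve(A):
--     # Scan candidate bases upward, growing the repunit incrementally.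
--     # Any repunit of length >= 3 in base b is at least 1 + b + b*b, so only
--     # bases with 1 + b + b*b <= A can work with length >= 3; the only
--     # length-2 repunit equal to A uses base A - 1, which is the fallback.
--     A = int(A)
--     b = 2
--     while 1 + b + b * b <= A:
--         s = 1 + b
--         p = b
--         while s < A:
--             p *= b
--             s += p
--         if s == A:
--             return b
--         b += 1
--     return A - 1
-- ===== Notes on version B (the rewrite author's own statement) =====
-- stated objective: simpler
-- what changed: Replaced A's outer loop over repunit lengths with a binary search over bases per length by a single ascending scan of candidate bases that grows each base's repunit incrementally and returns the first (hence smallest) matching base, with A-1 as the fallback.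
import Mathlib
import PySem

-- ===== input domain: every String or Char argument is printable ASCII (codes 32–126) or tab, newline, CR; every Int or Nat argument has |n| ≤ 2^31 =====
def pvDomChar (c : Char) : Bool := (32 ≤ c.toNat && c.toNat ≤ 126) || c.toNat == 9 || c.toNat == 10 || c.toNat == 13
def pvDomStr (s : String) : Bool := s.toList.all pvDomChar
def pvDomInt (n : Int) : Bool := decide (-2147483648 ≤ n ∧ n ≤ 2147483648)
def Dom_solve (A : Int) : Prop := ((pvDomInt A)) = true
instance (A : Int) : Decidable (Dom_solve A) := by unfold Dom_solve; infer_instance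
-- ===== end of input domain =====

-- B replaces A's per-length binary search over bases by a single ascending scan of
-- candidate bases that grows each repunit incrementally (objective: simpler).

-- ===== PORT A =====
-- inner 'while left <= right' binary search of A
def innerA (A d left right ans : Int) : Int :=
  if h : left ≤ right then
    let base := PySem.Int.floordiv (left + right) 2
    let calcv := PySem.Int.floordiv (base ^ d.toNat - 1) (base - 1)
    if calcv = A then innerA A d left (base - 1) (min ans base)
    else if calcv > A then innerA A d left (base - 1) ans
    else innerA A d (base + 1) right ans
  else ans
termination_by (right + 1 - left).toNat
decreasing_by
  all_goals
    have hb := PySem.Int.floordiv_two_mid_bounds h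
    omega

-- outer 'while pow(2, d) <= A + 1' loop of A
def outerA (A d ans : Int) : Int :=
  if h : (2 : Int) ^ d.toNat ≤ A + 1 then
    outerA A (d + 1) (innerA A d 2 (A - 1) ans)
  else ans
termination_by (A + 1 - d).toNat
decreasing_by
  have h1 : (d.toNat : Int) < (2 : Int) ^ d.toNat := by exact_mod_cast Nat.lt_two_pow_self
  omega

def solve (A : Int) : Int := outerA A 2 (A - 1)

-- ===== PORT B =====
-- inner 'while s < A' loop of B; hb/hp are invariants carried only for termination
def growB (A b s p : Int) (hb : 2 ≤ b) (hp : 1 ≤ p) : Int :=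
  if h : s < A then growB A b (s + p * b) (p * b) hb (by nlinarith) else s
termination_by (A - s).toNat
decreasing_by
  have h2 : (2 : Int) ≤ p * b := by nlinarith
  omega

-- outer 'while 1 + b + b*b <= A' scan of B
def scanB (A b : Int) (hb : 2 ≤ b) : Int :=
  if h : 1 + b + b * b ≤ A then
    if growB A b (1 + b) b hb (by omega) = A then b
    else scanB A (b + 1) (by omega)
  else A - 1
termination_by (A - b).toNat
decreasing_by
  have h2 : (0 : Int) ≤ b * b := mul_self_nonneg b
  omega

def solve_alt (A : Int) : Int := scanB A 2 (by omega)

-- ===== PRECONDITION & SPEC =====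
def Spec_solve (A : Int) (out : Int) : Prop := out = solve_alt A
instance (A : Int) (out : Int) : Decidable (Spec_solve A out) := by unfold Spec_solve; infer_instance

-- ===== CLAIM (what is proved, stated in full; the proofs are below) =====
def Claim_equal_solve : Prop := ∀ (A : Int), Dom_solve A → Spec_solve A (solve A)

-- ===== LEMMAS AND PROOFS =====

-- value of the repunit of length d in base b: 1 + b + … + b^(d-1)
def repsum (b : Int) : Nat → Int
  | 0 => 0
  | d + 1 => repsum b d + b ^ d

-- 'b is a base in which A is a repunit of length ≥ 2'
def GoodB (A b : Int) : Prop := 2 ≤ b ∧ ∃ d : Nat, 2 ≤ d ∧ repsum b d = A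

-- bases still reachable by A's outer loop from counter d0
def GoodA (A d0 b : Int) : Prop :=
  2 ≤ b ∧ b ≤ A - 1 ∧
    ∃ d : Nat, d0 ≤ (d : Int) ∧ 2 ≤ d ∧ (2 : Int) ^ d ≤ A + 1 ∧ repsum b d = A

lemma repsum_two (b : Int) : repsum b 2 = 1 + b := by simp [repsum]

lemma repsum_three (b : Int) : repsum b 3 = 1 + b + b * b := by
  simp [repsum]; ring

lemma repsum_geom (b : Int) (d : Nat) : (b - 1) * repsum b d = b ^ d - 1 := by
  induction d with
  | zero => simp [repsum]
  | succ d ih => simp [repsum]; ring_nf; ring_nf at ih; linarith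

lemma calc_eq (b : Int) (hb : 2 ≤ b) (d : Nat) :
    PySem.Int.floordiv (b ^ d - 1) (b - 1) = repsum b d := by
  rw [← repsum_geom, PySem.Int.floordiv_eq_ediv_of_pos (by omega)]
  exact Int.mul_ediv_cancel_left _ (by omega)

lemma repsum_mono_base (x y : Int) (hx : 0 ≤ x) (hxy : x ≤ y) (d : Nat) :
    repsum x d ≤ repsum y d := by
  induction d with
  | zero => simp [repsum]
  | succ d ih => simpa [repsum] using add_le_add ih (pow_le_pow_left₀ hx hxy d)

lemma repsum_strict_base (x y : Int) (hx : 2 ≤ x) (hxy : x < y) (d : Nat) (hd : 2 ≤ d) :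
    repsum x d < repsum y d := by
  obtain ⟨e, rfl⟩ : ∃ e, d = e + 2 := ⟨d - 2, by omega⟩
  have h1 : repsum x (e + 1) ≤ repsum y (e + 1) :=
    repsum_mono_base x y (by omega) (le_of_lt hxy) _
  have h2 : x ^ (e + 1) < y ^ (e + 1) :=
    pow_lt_pow_left₀ hxy (by omega) (by omega)
  simpa [repsum] using add_lt_add_of_le_of_lt h1 h2

lemma repsum_mono_len (b : Int) (hb : 2 ≤ b) {d e : Nat} (h : d ≤ e) :
    repsum b d ≤ repsum b e := by
  induction e, h using Nat.le_induction with
  | base => exact le_refl _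
  | succ e he ih =>
      have : (0 : Int) < b ^ e := pow_pos (by omega) e
      simp only [repsum]; omega

lemma two_pow_sub_one_le (b : Int) (hb : 2 ≤ b) (d : Nat) :
    (2 : Int) ^ d - 1 ≤ repsum b d := by
  have h := repsum_geom 2 d
  have h2 := repsum_mono_base 2 b (by omega) hb d
  omega

lemma repsum_ge (b : Int) (hb : 2 ≤ b) (d : Nat) (hd : 2 ≤ d) :
    1 + b ≤ repsum b d := by
  have := repsum_mono_len b hb hd
  rw [repsum_two] at this; exact this

-- GoodB bases never exceed A - 1
lemma goodB_le (A b : Int) (h : GoodB A b) : b ≤ A - 1 := by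
  obtain ⟨hb, d, hd, hr⟩ := h
  have := repsum_ge b hb d hd
  omega

lemma goodA_iff_goodB (A b : Int) : GoodA A 2 b ↔ GoodB A b := by
  constructor
  · rintro ⟨hb, _, d, _, hd, _, hr⟩; exact ⟨hb, d, hd, hr⟩
  · rintro h
    obtain ⟨hb, d, hd, hr⟩ := id h
    refine ⟨hb, goodB_le A b h, d, by exact_mod_cast hd, hd, ?_, hr⟩
    have := two_pow_sub_one_le b hb d
    omega

-- ===== B-side characterization =====

lemma grow_char (A b : Int) (hb : 2 ≤ b) :
    ∀ (n : Nat) (s p : Int) (d : Nat), s = repsum b (d + 1) → p = b ^ d →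
      (A - s).toNat = n → ∀ (hp : 1 ≤ p),
      (growB A b s p hb hp = A ↔ ∃ e : Nat, d + 1 ≤ e ∧ repsum b e = A) := by
  intro n
  induction n using Nat.strong_induction_on with
  | _ n ih =>
    intro s p d hs hpv hn hp
    rw [growB]
    split_ifs with h
    · -- s < A : one more term
      have hpow : (0 : Int) < b ^ (d + 1) := pow_pos (by omega) _
      have hs' : s + p * b = repsum b (d + 2) := by
        simp [hs, hpv, repsum, pow_succ]
      have hp' : p * b = b ^ (d + 1) := by rw [hpv, pow_succ]
      have hmeas : (A - (s + p * b)).toNat < n := by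
        have h1 : (1 : Int) ≤ p * b := by nlinarith
        omega
      rw [ih _ hmeas (s + p * b) (p * b) (d + 1) hs' hp' rfl _]
      constructor
      · rintro ⟨e, he, hre⟩; exact ⟨e, by omega, hre⟩
      · rintro ⟨e, he, hre⟩
        refine ⟨e, ?_, hre⟩
        rcases Nat.lt_or_ge e (d + 2) with h1 | h1
        · have he1 : e = d + 1 := by omega
          subst he1; omega
        · omega
    · -- s ≥ A : stop
      constructor
      · intro hrs; exact ⟨d + 1, le_refl _, by omega⟩
      · rintro ⟨e, he, hre⟩
        have := repsum_mono_len b hb he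
        omega

lemma scan_char (A : Int) :
    ∀ (n : Nat) (b : Int) (hb : 2 ≤ b), (A - b).toNat = n →
      ((scanB A b hb = A - 1 ∨
          (b ≤ scanB A b hb ∧ GoodB A (scanB A b hb) ∧
            1 + scanB A b hb + scanB A b hb * scanB A b hb ≤ A)) ∧
        ∀ x, b ≤ x → 1 + x + x * x ≤ A → GoodB A x → scanB A b hb ≤ x) := by
  intro n
  induction n using Nat.strong_induction_on with
  | _ n ih =>
    intro b hb hn
    rw [scanB]
    have hgrow := grow_char A b hb (A - (1 + b)).toNat (1 + b) b 1
      (by rw [repsum_two]) (by rw [pow_one]) rfl (by omega)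
    split_ifs with h hq
    · -- guard ∧ grow hit: return b
      refine ⟨Or.inr ⟨le_refl b, ⟨hb, ?_⟩, h⟩, fun x hx _ _ => hx⟩
      rw [hgrow] at hq
      obtain ⟨e, he, hre⟩ := hq
      exact ⟨e, by omega, hre⟩
    · -- guard ∧ miss: recurse
      have hmeas : (A - (b + 1)).toNat < n := by
        have : (0 : Int) ≤ b * b := mul_self_nonneg b
        omega
      obtain ⟨h1, h2⟩ := ih _ hmeas (b + 1) (by omega) rfl
      refine ⟨?_, ?_⟩
      · rcases h1 with h1 | ⟨ha, hg, hgu⟩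
        · exact Or.inl h1
        · exact Or.inr ⟨by omega, hg, hgu⟩
      · intro x hx hxg hgx
        rcases eq_or_lt_of_le hx with rfl | hlt
        · exfalso
          obtain ⟨_, d, hd, hrd⟩ := hgx
          exact hq (hgrow.mpr ⟨d, by omega, hrd⟩)
        · exact h2 x (by omega) hxg hgx
    · -- guard fails: return A - 1
      refine ⟨Or.inl rfl, fun x hx hxg hgx => ?_⟩
      exfalso
      obtain ⟨hx2, _⟩ := hgx
      nlinarith

-- ===== A-side characterization =====

lemma inner_char (A d : Int) (hd : 2 ≤ d) :
    ∀ (n : Nat) (left right ans : Int), 2 ≤ left → (right + 1 - left).toNat = n →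
      ((innerA A d left right ans = ans ∨
          (left ≤ innerA A d left right ans ∧ innerA A d left right ans ≤ right ∧
            repsum (innerA A d left right ans) d.toNat = A)) ∧
        innerA A d left right ans ≤ ans ∧
        ∀ x, left ≤ x → x ≤ right → repsum x d.toNat = A →
          innerA A d left right ans ≤ x) := by
  have hdn : 2 ≤ d.toNat := by omega
  intro n
  induction n using Nat.strong_induction_on with
  | _ n ih =>
    intro left right ans hl hn
    rw [innerA]
    split_ifs with h
    case neg =>
      exact ⟨Or.inl rfl, le_refl _, fun x hx1 hx2 _ => absurd (le_trans hx1 hx2) h⟩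
    simp only []
    have hmid := PySem.Int.floordiv_two_mid_bounds h
    set base := PySem.Int.floordiv (left + right) 2 with hbase
    have hb2 : 2 ≤ base := by omega
    rw [calc_eq base hb2 d.toNat]
    split_ifs with hc hgt
    · -- found: search lower half with ans' = min ans base
      have hmeas : (base - 1 + 1 - left).toNat < n := by omega
      obtain ⟨h1, h2, h3⟩ := ih _ hmeas left (base - 1) (min ans base) hl rfl
      refine ⟨?_, le_trans h2 (min_le_left _ _), ?_⟩
      · rcases h1 with h1 | ⟨ha, hbnd, hr⟩
        · rcases le_total ans base with hab | hab
          · rw [h1, min_eq_left hab]; exact Or.inl rfl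
          · rw [h1, min_eq_right hab]
            exact Or.inr ⟨by omega, by omega, hc⟩
        · exact Or.inr ⟨ha, by omega, hr⟩
      · intro x hx1 hx2 hx3
        have hxb : x = base := by
          by_contra hne
          rcases lt_or_gt_of_ne hne with hlt | hgt'
          · have := repsum_strict_base x base (by omega) hlt d.toNat hdn
            omega
          · have := repsum_strict_base base x hb2 hgt' d.toNat hdn
            omega
        subst hxb
        exact le_trans h2 (min_le_right _ _)
    · -- calc > A: go left
      have hmeas : (base - 1 + 1 - left).toNat < n := by omega
      obtain ⟨h1, h2, h3⟩ := ih _ hmeas left (base - 1) ans hl rfl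
      refine ⟨?_, h2, ?_⟩
      · rcases h1 with h1 | ⟨ha, hbnd, hr⟩
        · exact Or.inl h1
        · exact Or.inr ⟨ha, by omega, hr⟩
      · intro x hx1 hx2 hx3
        have hxb : x < base := by
          by_contra hge
          push Not at hge
          rcases eq_or_lt_of_le hge with heq | hlt
          · subst heq; omega
          · have := repsum_strict_base base x hb2 hlt d.toNat hdn
            omega
        exact h3 x hx1 (by omega) hx3
    · -- calc < A: go right
      have hclt : repsum base d.toNat < A := by
        rcases lt_trichotomy (repsum base d.toNat) A with h1 | h1 | h1
        · exact h1
        · exact absurd h1 hc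
        · exact absurd h1 hgt
      have hmeas : (right + 1 - (base + 1)).toNat < n := by omega
      obtain ⟨h1, h2, h3⟩ := ih _ hmeas (base + 1) right ans (by omega) rfl
      refine ⟨?_, h2, ?_⟩
      · rcases h1 with h1 | ⟨ha, hbnd, hr⟩
        · exact Or.inl h1
        · exact Or.inr ⟨by omega, hbnd, hr⟩
      · intro x hx1 hx2 hx3
        have hxb : base < x := by
          by_contra hge
          push Not at hge
          rcases eq_or_lt_of_le hge with heq | hlt
          · subst heq; omega
          · have := repsum_strict_base x base (by omega) hlt d.toNat hdn
            omega
        exact h3 x (by omega) hx2 hx3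

lemma outer_char (A : Int) :
    ∀ (n : Nat) (d0 ans : Int), 2 ≤ d0 → (A + 1 - d0).toNat = n →
      ((outerA A d0 ans = ans ∨ GoodA A d0 (outerA A d0 ans)) ∧
        outerA A d0 ans ≤ ans ∧
        ∀ b, GoodA A d0 b → outerA A d0 ans ≤ b) := by
  intro n
  induction n using Nat.strong_induction_on with
  | _ n ih =>
    intro d0 ans hd0 hn
    rw [outerA]
    split_ifs with h
    · obtain ⟨i1, i2, i3⟩ := inner_char A d0 hd0 (A - 1 + 1 - 2).toNat 2 (A - 1) ans (le_refl 2) rfl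
      set ans' := innerA A d0 2 (A - 1) ans with hans'
      have hdlt : (d0.toNat : Int) < (2 : Int) ^ d0.toNat := by
        exact_mod_cast Nat.lt_two_pow_self
      have hmeas : (A + 1 - (d0 + 1)).toNat < n := by omega
      obtain ⟨o1, o2, o3⟩ := ih _ hmeas (d0 + 1) ans' (by omega) rfl
      refine ⟨?_, le_trans o2 i2, ?_⟩
      · rcases o1 with o1 | ⟨ob, obn, e, he1, he2, he3, he4⟩
        · rw [o1]
          rcases i1 with i1 | ⟨ia, ib, ir⟩
          · exact Or.inl i1
          · refine Or.inr ⟨ia, ib, d0.toNat, by omega, by omega, ?_, ir⟩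
            have : ((2 : Int) ^ d0.toNat) = (2 : Int) ^ d0.toNat := rfl
            exact h
        · exact Or.inr ⟨ob, obn, e, by omega, he2, he3, he4⟩
      · rintro b ⟨hb2, hbn, e, he1, he2, he3, he4⟩
        rcases eq_or_lt_of_le he1 with heq | hlt
        · have hed : e = d0.toNat := by omega
          subst hed
          exact le_trans o2 (i3 b hb2 hbn he4)
        · exact o3 b ⟨hb2, hbn, e, by omega, he2, he3, he4⟩
    · refine ⟨Or.inl rfl, le_refl _, ?_⟩
      rintro b ⟨_, _, e, he1, he2, he3, he4⟩
      exfalso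
      have hpow : (2 : Int) ^ d0.toNat ≤ (2 : Int) ^ e :=
        pow_le_pow_right₀ (by norm_num) (by omega)
      omega

-- ===== VERDICT (by name: the statement is the Claim_ definition above) =====
theorem solve_spec : Claim_equal_solve := by
  unfold Claim_equal_solve Spec_solve
  intro A _
  unfold solve solve_alt
  obtain ⟨a1, a2, a3⟩ := outer_char A (A + 1 - 2).toNat 2 (A - 1) (le_refl 2) rfl
  obtain ⟨b1, b2⟩ := scan_char A (A - 2).toNat 2 (by omega) rfl
  set r := outerA A 2 (A - 1) with hr
  set r' := scanB A 2 (by omega) with hr'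
  by_cases hex : ∃ b, GoodB A b
  · obtain ⟨ℓ, hℓg, hℓmin⟩ :=
      Int.exists_least_of_bdd (P := fun b => GoodB A b)
        ⟨2, fun z hz => hz.1⟩ hex
    have hℓA : ℓ ≤ A - 1 := goodB_le A ℓ hℓg
    -- A-side: r = ℓ
    have hrl : r ≤ ℓ := a3 ℓ ((goodA_iff_goodB A ℓ).mpr hℓg)
    have hAr : r = ℓ := by
      rcases a1 with h1 | h1
      · have := hℓmin
        omega
      · have hgb := (goodA_iff_goodB A r).mp h1
        have := hℓmin r hgb
        omega
    -- B-side: r' = ℓ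
    have hBr : r' = ℓ := by
      by_cases hgu : 1 + ℓ + ℓ * ℓ ≤ A
      · have hrl' : r' ≤ ℓ := b2 ℓ hℓg.1 hgu hℓg
        rcases b1 with h1 | ⟨_, hg, _⟩
        · omega
        · have := hℓmin r' hg
          omega
      · -- guard fails at ℓ: the only possibility is ℓ = A - 1
        have hℓeq : ℓ = A - 1 := by
          obtain ⟨hℓ2, d, hd, hrd⟩ := hℓg
          rcases Nat.lt_or_ge d 3 with h3 | h3
          · have hd2 : d = 2 := by omega
            subst hd2
            rw [repsum_two] at hrd
            omega
          · exfalso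
            have := repsum_mono_len ℓ hℓ2 h3
            rw [repsum_three] at this
            omega
        rcases b1 with h1 | ⟨_, hg, _⟩
        · omega
        · have h1 := hℓmin r' hg
          have h2 := goodB_le A r' hg
          omega
    omega
  · push Not at hex
    have hAr : r = A - 1 := by
      rcases a1 with h1 | h1
      · exact h1
      · exact absurd ((goodA_iff_goodB A r).mp h1) (hex r)
    have hBr : r' = A - 1 := by
      rcases b1 with h1 | ⟨_, hg, _⟩
      · exact h1
      · exact absurd hg (hex r')
    omega
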